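-- pv_equiv track=rewrite | github.com/qn06142/coding-python | cvahn_x11_nenxau.py | check_expression
-- ===== SOURCE A (Python) =====
-- from string import ascii_lowercase
--
-- def check_expression(s):
-- 	s = s.lower()
-- 	flag = False
-- 	if any(i in s for i in ascii_lowercase):
-- 		flag = True
-- 	open_brackets = s.count('(')
-- 	close_brackets = s.count(')')
-- 	if open_brackets == close_brackets:
-- 		return 'DUNG'
-- 	elif not flag:
-- 		return 'KHONGDUNG'
-- 	else:
-- 		return 'KHONGHOPLE'
-- ===== SOURCE B (Python) =====
-- from string import ascii_lowercase
--
-- def _scan(t, lo, hi):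
--     # divide and conquer: (bracket balance, letter-seen) form a monoid under (+, or)
--     if hi - lo == 0:
--         return 0, False
--     if hi - lo == 1:
--         c = t[lo]
--         if c == '(':
--             return 1, False
--         if c == ')':
--             return -1, False
--         return 0, c in ascii_lowercase
--     mid = (lo + hi) // 2
--     b1, l1 = _scan(t, lo, mid)
--     b2, l2 = _scan(t, mid, hi)
--     return b1 + b2, l1 or l2
--
-- def check_expression(s):
--     t = s.lower()
--     balance, has_letter = _scan(t, 0, len(t))
--     if balance == 0:
--         return 'DUNG'
--     if not has_letter:
--         return 'KHONGDUNG'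
--     return 'KHONGHOPLE'
-- ===== Notes on version B (the rewrite author's own statement) =====
-- stated objective: alternative
-- what changed: B replaces A's 26 substring-membership scans and two count passes with a divide-and-conquer reduction over s.lower(): it recursively splits the index range in half and combines (bracket balance, letter-seen) pairs, which form a monoid under (+, or), then judges the single combined pair.
import Mathlib
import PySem

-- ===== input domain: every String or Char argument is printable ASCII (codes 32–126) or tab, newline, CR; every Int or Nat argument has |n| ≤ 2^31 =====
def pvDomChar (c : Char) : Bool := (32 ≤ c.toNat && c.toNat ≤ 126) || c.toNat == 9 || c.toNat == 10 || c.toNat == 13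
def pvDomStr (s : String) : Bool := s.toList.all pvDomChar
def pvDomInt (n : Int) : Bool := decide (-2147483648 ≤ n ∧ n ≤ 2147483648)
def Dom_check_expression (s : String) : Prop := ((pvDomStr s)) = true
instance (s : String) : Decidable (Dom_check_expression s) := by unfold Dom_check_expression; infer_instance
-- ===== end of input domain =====

-- B replaces A's 26 substring scans and two count passes with a divide-and-conquer monoid reduction; objective: alternative.


-- ===== PORT A =====
-- string.ascii_lowercase
def asciiLowercase : List Char := "abcdefghijklmnopqrstuvwxyz".toList

def check_expression (s : String) : String :=
  let t := PySem.Chars.lower s.toList              -- s = s.lower()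
  let flag :=                                      -- flag = False; if any(i in s for i in ascii_lowercase): flag = True
    if asciiLowercase.any (fun i => PySem.Chars.isIn [i] t) then true else false
  let open_brackets := PySem.Chars.count t ['(']   -- s.count('(')
  let close_brackets := PySem.Chars.count t [')']  -- s.count(')')
  if open_brackets = close_brackets then "DUNG"
  else if flag = false then "KHONGDUNG"
  else "KHONGHOPLE"

-- ===== PORT B =====
-- _scan(t, lo, hi): divide and conquer over the index range; (balance, letter-seen) monoid
def bScan (t : List Char) (lo hi : Nat) : Int × Bool :=
  if hi - lo = 0 then (0, false)
  else if hi - lo = 1 then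
    let c := t.getD lo ' '                         -- c = t[lo] (lo < hi ≤ len t on every reachable call)
    if c = '(' then (1, false)
    else if c = ')' then (-1, false)
    else (0, asciiLowercase.contains c)            -- c in ascii_lowercase
  else
    let mid := (lo + hi) / 2
    let r1 := bScan t lo mid
    let r2 := bScan t mid hi
    (r1.1 + r2.1, r1.2 || r2.2)
termination_by hi - lo
decreasing_by all_goals omega

def check_expression_alt (s : String) : String :=
  let t := PySem.Chars.lower s.toList              -- t = s.lower()
  let r := bScan t 0 t.length                      -- balance, has_letter = _scan(t, 0, len(t))
  if r.1 = 0 then "DUNG"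
  else if r.2 = false then "KHONGDUNG"
  else "KHONGHOPLE"

-- ===== PRECONDITION & SPEC =====
def Spec_check_expression (s : String) (out : String) : Prop := out = check_expression_alt s
instance (s : String) (out : String) : Decidable (Spec_check_expression s out) := by unfold Spec_check_expression; infer_instance

-- ===== CLAIM (what is proved, stated in full; the proofs are below) =====
def Claim_equal_check_expression : Prop := ∀ (s : String), Dom_check_expression s → Spec_check_expression s (check_expression s)

-- ===== LEMMAS AND PROOFS =====

-- count.go with a singleton needle counts occurrences of that character
theorem count_go_singleton (c : Char) : ∀ (t : List Char) (acc : Nat),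
    PySem.Chars.count.go [c] t.length t acc = acc + t.count c := by
  intro t
  induction t with
  | nil => intro acc; simp [PySem.Chars.count.go]
  | cons a t ih =>
    intro acc
    rw [List.length_cons, PySem.Chars.count.go.eq_def]
    by_cases h : c = a
    · subst h
      simp [List.isPrefixOf, ih]
      omega
    · simp [List.isPrefixOf, h, ih, Ne.symm h]

theorem count_singleton (t : List Char) (c : Char) :
    PySem.Chars.count t [c] = t.count c := by
  simpa [PySem.Chars.count] using count_go_singleton c t 0

-- A's 26 membership scans say exactly: some character of t is an ascii lowercase letter
theorem flag_iff (t : List Char) :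
    (asciiLowercase.any fun i => PySem.Chars.isIn [i] t)
      = (t.any fun c => asciiLowercase.contains c) := by
  apply Bool.eq_iff_iff.mpr
  rw [List.any_eq_true, List.any_eq_true]
  constructor
  · rintro ⟨i, hi, hin⟩
    exact ⟨i, (List.singleton_infix_iff i t).mp ((PySem.Chars.isIn_iff_infix [i] t).mp hin),
      by simpa using hi⟩
  · rintro ⟨c, hc, hin⟩
    exact ⟨c, by simpa using hin,
      (PySem.Chars.isIn_iff_infix [c] t).mpr ((List.singleton_infix_iff c t).mpr hc)⟩

-- the value B's divide-and-conquer combines: balance and letter flag of a chunk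
def specPair (u : List Char) : Int × Bool :=
  ((u.count '(' : Int) - (u.count ')' : Int), u.any fun c => asciiLowercase.contains c)

theorem specPair_append (u v : List Char) :
    specPair (u ++ v) = ((specPair u).1 + (specPair v).1, (specPair u).2 || (specPair v).2) := by
  simp [specPair]; omega

theorem specPair_singleton (c : Char) :
    specPair [c] = (if c = '(' then ((1 : Int), false)
      else if c = ')' then (-1, false) else (0, asciiLowercase.contains c)) := by
  have h1 : ¬ ('(' ∈ asciiLowercase) := by decide
  have h2 : ¬ (')' ∈ asciiLowercase) := by decide
  by_cases hc1 : c = '('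
  · subst hc1; simp [specPair, h1]
  · by_cases hc2 : c = ')'
    · subst hc2; simp [specPair, h2]
    · simp [specPair, hc1, hc2]

-- B's recursion computes specPair of the chunk it was called on
theorem bScan_eq (t : List Char) : ∀ (n lo hi : Nat), hi - lo = n → hi ≤ t.length →
    bScan t lo hi = specPair ((t.drop lo).take (hi - lo)) := by
  intro n
  induction n using Nat.strong_induction_on with
  | _ n ih =>
    intro lo hi hn hle
    rw [bScan]
    by_cases h0 : hi - lo = 0
    · simp [h0, specPair]
    · by_cases h1 : hi - lo = 1
      · have hlt : lo < t.length := by omega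
        have hget : t.getD lo ' ' = t[lo] := by
          simp [List.getD_eq_getElem?_getD, List.getElem?_eq_getElem hlt]
        have htake : (t.drop lo).take (hi - lo) = [t[lo]] := by
          rw [h1]
          simp [List.take_one, List.head?_drop, List.getElem?_eq_getElem hlt]
        rw [htake, specPair_singleton, ← hget]
        simp [h1]
      · have hmidlo : (lo + hi) / 2 - lo < n := by omega
        have hhimid : hi - (lo + hi) / 2 < n := by omega
        have key1 := ih _ hmidlo lo ((lo + hi) / 2) rfl (by omega)
        have key2 := ih _ hhimid ((lo + hi) / 2) hi rfl hle
        have hsplit : (t.drop lo).take (hi - lo)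
            = (t.drop lo).take ((lo + hi) / 2 - lo)
              ++ (t.drop ((lo + hi) / 2)).take (hi - (lo + hi) / 2) := by
          have hd : t.drop ((lo + hi) / 2) = (t.drop lo).drop ((lo + hi) / 2 - lo) := by
            rw [List.drop_drop]; congr 1; omega
          rw [hd, ← List.take_add]
          congr 1; omega
        rw [hsplit, specPair_append]
        simp [h0, h1, key1, key2]

-- ===== VERDICT (by name: the statement is the Claim_ definition above) =====
theorem check_expression_spec : Claim_equal_check_expression := by
  intro s _
  unfold Spec_check_expression
  show check_expression s = check_expression_alt s
  simp only [check_expression, check_expression_alt, count_singleton, flag_iff,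
    bScan_eq _ _ 0 _ rfl le_rfl]
  simp only [Nat.sub_zero, List.drop_zero, List.take_length, specPair]
  set t := PySem.Chars.lower s.toList
  by_cases h : t.count '(' = t.count ')'
  · simp [h]
  · have h' : ¬ ((t.count '(' : Int) - (t.count ')' : Int) = 0) := by
      intro he; apply h; omega
    simp [h, h']
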